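-- pv_equiv track=rewrite | github.com/ozodbekAI/WBCHEKCER | scripts/export_wb_to_excel.py | _extract_campaign_ids
-- ===== SOURCE A (Python) =====
-- from typing import Any, Dict, Iterable, List, Optional, Sequence
--
-- def _extract_campaign_ids(rows: Sequence[dict[str, Any]]) -> list[int]:
--     ids: set[int] = set()
--     for row in rows:
--         value = row.get("advert_id")
--         try:
--             if value:
--                 ids.add(int(value))
--         except Exception:
--             pass
--     return sorted(ids)
-- ===== SOURCE B (Python) =====
-- from typing import Any, Sequence
--
-- def _insort_unique(lst: list, v: int) -> None:
--     i = 0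
--     while i < len(lst) and lst[i] < v:
--         i += 1
--     if i == len(lst) or lst[i] != v:
--         lst.insert(i, v)
--
-- def _extract_campaign_ids(rows: Sequence[dict[str, Any]]) -> list[int]:
--     result: list[int] = []
--     for row in rows:
--         value = row.get("advert_id")
--         try:
--             if value:
--                 _insort_unique(result, int(value))
--         except Exception:
--             pass
--     return result
-- ===== Notes on version B (the rewrite author's own statement) =====
-- stated objective: alternative
-- what changed: B keeps the result as a sorted duplicate-free list at all times, inserting each accepted id at its position (skipping it if already present) in a single pass, instead of A's set accumulation followed by a final sort.
import Mathlib
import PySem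

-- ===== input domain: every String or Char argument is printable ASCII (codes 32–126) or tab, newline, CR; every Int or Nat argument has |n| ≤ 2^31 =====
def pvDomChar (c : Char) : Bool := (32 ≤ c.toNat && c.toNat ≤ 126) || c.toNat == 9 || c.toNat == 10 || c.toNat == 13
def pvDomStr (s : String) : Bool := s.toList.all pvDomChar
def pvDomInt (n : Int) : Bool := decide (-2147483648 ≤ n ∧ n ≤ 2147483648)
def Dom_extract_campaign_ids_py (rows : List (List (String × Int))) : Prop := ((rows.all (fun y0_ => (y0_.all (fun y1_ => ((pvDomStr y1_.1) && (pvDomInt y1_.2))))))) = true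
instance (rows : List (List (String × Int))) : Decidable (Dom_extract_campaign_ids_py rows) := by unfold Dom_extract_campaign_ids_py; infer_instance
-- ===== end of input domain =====

-- B maintains the answer as a sorted duplicate-free list throughout, inserting each
-- accepted id at its sorted position (skipped if present), instead of A's
-- set accumulation followed by a final sort; a different data structure, same values.

-- ===== PORT A =====
-- ids = set(); for row: value = row.get("advert_id"); if value: ids.add(int(value)); return sorted(ids)
def extract_campaign_ids_py (rows : List (List (String × Int))) : List Int :=
  let ids : PySem.Set Int :=
    rows.foldl (fun ids row =>
      match PySem.Dict.get? (PySem.Dict.mk row) "advert_id" with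
      | none => ids                                   -- value is None: falsy, skipped
      | some v => if v ≠ 0 then PySem.Set.add ids v else ids) PySem.Set.empty
  PySem.List.sorted ids (fun x => x) false

-- ===== PORT B =====
-- _insort_unique: linear scan past smaller elements, insert v unless already there
def pvInsortUnique : List Int → Int → List Int
  | [], v => [v]
  | x :: t, v =>
      if x < v then x :: pvInsortUnique t v
      else if x = v then x :: t
      else v :: x :: t

-- result = []; for row: fetch/truthiness as in the source, _insort_unique(result, v); return result
def extract_campaign_ids_py_alt (rows : List (List (String × Int))) : List Int :=
  rows.foldl (fun result row =>
    match PySem.Dict.get? (PySem.Dict.mk row) "advert_id" with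
    | none => result
    | some v => if v ≠ 0 then pvInsortUnique result v else result) []

-- ===== PRECONDITION & SPEC =====
def Spec_extract_campaign_ids_py (rows : List (List (String × Int))) (out : List Int) : Prop := out = extract_campaign_ids_py_alt rows
instance (rows : List (List (String × Int))) (out : List Int) : Decidable (Spec_extract_campaign_ids_py rows out) := by unfold Spec_extract_campaign_ids_py; infer_instance

-- ===== CLAIM (what is proved, stated in full; the proofs are below) =====
def Claim_equal_extract_campaign_ids_py : Prop := ∀ (rows : List (List (String × Int))), Dom_extract_campaign_ids_py rows → Spec_extract_campaign_ids_py rows (extract_campaign_ids_py rows)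

-- ===== LEMMAS AND PROOFS =====

-- the accepted values of the rows, in row order (proof-only abstraction of both folds)
def pvVals (rows : List (List (String × Int))) : List Int :=
  rows.filterMap (fun row =>
    match PySem.Dict.get? (PySem.Dict.mk row) "advert_id" with
    | none => none
    | some v => if v ≠ 0 then some v else none)

-- both per-row folds are the same fold over pvVals
theorem pv_fold_vals {β : Type} (h : β → Int → β) (rows : List (List (String × Int))) :
    ∀ (init : β),
    rows.foldl (fun b row =>
      match PySem.Dict.get? (PySem.Dict.mk row) "advert_id" with
      | none => b
      | some v => if v ≠ 0 then h b v else b) init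
    = (pvVals rows).foldl h init := by
  induction rows with
  | nil => intro init; simp [pvVals]
  | cons row rows ih =>
    intro init
    simp only [List.foldl_cons, pvVals, List.filterMap_cons]
    cases hg : PySem.Dict.get? (PySem.Dict.mk row) "advert_id" with
    | none => simpa [pvVals] using ih init
    | some v =>
      by_cases hv : v ≠ 0
      · simp only [if_pos hv]
        simpa [pvVals] using ih (h init v)
      · simp only [if_neg hv]
        simpa [pvVals] using ih init

theorem pv_mem_insort (l : List Int) (v x : Int) :
    x ∈ pvInsortUnique l v ↔ x ∈ l ∨ x = v := by
  induction l with
  | nil => simp [pvInsortUnique]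
  | cons a t ih =>
    by_cases h1 : a < v
    · simp [pvInsortUnique, if_pos h1, ih]; tauto
    · by_cases h2 : a = v
      · subst h2; simp [pvInsortUnique]; tauto
      · simp [pvInsortUnique, if_neg h1, if_neg h2]; tauto

theorem pv_insort_pairwise (l : List Int) (v : Int) (h : l.Pairwise (· < ·)) :
    (pvInsortUnique l v).Pairwise (· < ·) := by
  induction l with
  | nil => simp [pvInsortUnique]
  | cons a t ih =>
    have ha := (List.pairwise_cons.mp h).1
    have ht := (List.pairwise_cons.mp h).2
    by_cases h1 : a < v
    · simp only [pvInsortUnique, if_pos h1]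
      refine List.pairwise_cons.mpr ⟨?_, ih ht⟩
      intro b hb
      rcases (pv_mem_insort t v b).mp hb with hb' | rfl
      · exact ha b hb'
      · exact h1
    · by_cases h2 : a = v
      · simpa [pvInsortUnique, if_neg h1, if_pos h2] using h
      · simp only [pvInsortUnique, if_neg h1, if_neg h2]
        have hv : v < a := by omega
        refine List.pairwise_cons.mpr ⟨?_, h⟩
        intro b hb
        rcases List.mem_cons.mp hb with rfl | hb'
        · exact hv
        · exact lt_trans hv (ha b hb')

-- the insort fold yields a strictly increasing list with exactly the fold's members
theorem pv_insort_fold (vs : List Int) :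
    ∀ (acc : List Int), acc.Pairwise (· < ·) →
    (vs.foldl pvInsortUnique acc).Pairwise (· < ·) ∧
    (∀ x, x ∈ vs.foldl pvInsortUnique acc ↔ x ∈ acc ∨ x ∈ vs) := by
  induction vs with
  | nil => intro acc h; exact ⟨h, by simp⟩
  | cons v vs ih =>
    intro acc h
    simp only [List.foldl_cons]
    obtain ⟨r1, r2⟩ := ih (pvInsortUnique acc v) (pv_insort_pairwise acc v h)
    refine ⟨r1, fun x => ?_⟩
    rw [r2 x, pv_mem_insort]
    simp; tauto

-- ===== VERDICT (by name: the statement is the Claim_ definition above) =====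
theorem extract_campaign_ids_py_spec : Claim_equal_extract_campaign_ids_py := by
  intro rows _
  unfold Spec_extract_campaign_ids_py extract_campaign_ids_py extract_campaign_ids_py_alt
  rw [pv_fold_vals PySem.Set.add rows PySem.Set.empty,
      pv_fold_vals pvInsortUnique rows []]
  have hset : (pvVals rows).foldl PySem.Set.add PySem.Set.empty
      = PySem.Set.ofList (pvVals rows) := (PySem.Set.ofList_eq_foldl _).symm
  rw [hset]
  obtain ⟨r1, r2⟩ := pv_insort_fold (pvVals rows) [] (by simp)
  apply PySem.List.sorted_eq_of_perm_of_pairwise_lt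
  · rw [List.perm_ext_iff_of_nodup (r1.imp ne_of_lt) (PySem.Set.nodup_ofList _)]
    intro x
    rw [r2 x, PySem.Set.mem_ofList]
    simp
  · exact r1
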